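-- pv_equiv track=rewrite | github.com/Manasa041/ML-ita0614 | s algorithm.py | find_s
-- ===== SOURCE A (Python) =====
-- def find_s(training_data):
--     positive_examples = [example for example in training_data if example[-1] == 'Yes']
--     hypothesis = positive_examples[0][:-1]
--
--     for instance in positive_examples:
--         for i in range(len(hypothesis)):
--             if hypothesis[i] != instance[i]:
--                 hypothesis[i] = '?'
--     return hypothesis
-- ===== SOURCE B (Python) =====
-- def find_s(training_data):
--     positives = [example for example in training_data if example[-1] == 'Yes']
--     n = len(positives[0]) - 1
--     columns = list(zip(*positives))[:n]
--     return [col[0] if len(set(col)) == 1 else '?' for col in columns]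
-- ===== Notes on version B (the rewrite author's own statement) =====
-- stated objective: alternative
-- what changed: B transposes the positive examples once with zip(*) and decides each attribute by the cardinality of the set of its column values (len(set(col))==1), instead of A's destructive nested scan that mutates a hypothesis copy element-by-element against every instance.
import Mathlib
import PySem

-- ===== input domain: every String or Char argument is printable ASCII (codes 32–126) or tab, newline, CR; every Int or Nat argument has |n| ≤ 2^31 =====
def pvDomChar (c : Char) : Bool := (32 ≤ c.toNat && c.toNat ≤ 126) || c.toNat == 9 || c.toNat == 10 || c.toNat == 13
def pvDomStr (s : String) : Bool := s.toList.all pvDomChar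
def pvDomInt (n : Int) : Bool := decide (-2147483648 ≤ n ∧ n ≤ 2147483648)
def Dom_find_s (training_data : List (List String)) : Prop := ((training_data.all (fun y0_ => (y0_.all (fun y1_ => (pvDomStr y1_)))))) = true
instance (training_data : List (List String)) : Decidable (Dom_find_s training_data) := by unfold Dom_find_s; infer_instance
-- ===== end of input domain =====

-- B re-implements Find-S by transposing the positives with zip(*) and testing each
-- column's distinct-value set, instead of A's in-place row-wise generalization (alternative).

-- ===== PORT A =====
-- positive_examples = [ex for ex in training_data if ex[-1] == 'Yes']
-- (this line is shared verbatim by both Pythons, hence a shared helper)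
def pvPos (training_data : List (List String)) : List (List String) :=
  training_data.filter (fun ex => PySem.List.pyGet? ex (-1) == some "Yes")

-- body of A's inner loop: if hypothesis[i] != instance[i]: hypothesis[i] = '?'
def pvInnerStep (inst : List String) (h : List String) (i : Int) : List String :=
  if PySem.List.pyGet? h i != PySem.List.pyGet? inst i then PySem.List.pySetD h i "?" else h

-- 'positive_examples[0]' raises IndexError when there is no positive example, and
-- 'ex[-1]' raises on an empty row: the total port uses headD []/pyGet?, exact under Pre_.
def find_s (training_data : List (List String)) : List String :=
  let positive_examples := pvPos training_data
  let hypothesis := PySem.List.slice (positive_examples.headD []) none (some (-1))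
  positive_examples.foldl
    (fun hyp inst => (PySem.List.pyRange 0 (hyp.length : Int) 1).foldl (pvInnerStep inst) hyp)
    hypothesis

-- ===== PORT B =====
-- list(zip(*rows)): hand port of the builtin, exact — the number of columns is the
-- minimum row length, and column j holds row[j] of every row (always in range, j < m ≤ each length,
-- so getD's default is never used); zip of no rows is empty.
def pvZipStar (rows : List (List String)) : List (List String) :=
  match rows with
  | [] => []
  | r :: rs =>
    let m := rs.foldl (fun acc x => min acc x.length) r.length
    (List.range m).map (fun j => (r :: rs).map (fun row => row.getD j ""))

-- 'positives[0]' raises on empty positives (headD [], exact under Pre_); col[0] is always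
-- in range since every column has one entry per row (headD "", exact).
def find_s_alt (training_data : List (List String)) : List String :=
  let positives := pvPos training_data
  let n : Int := ((positives.headD []).length : Int) - 1
  let columns := PySem.List.slice (pvZipStar positives) none (some n)
  columns.map (fun col =>
    if (PySem.Set.ofList col).length == 1 then col.headD "" else "?")

-- ===== PRECONDITION & SPEC =====
-- Pre_ excludes exactly the inputs on which Python A raises IndexError: an empty row
-- (example[-1]), no positive example (positive_examples[0]), or a positive example
-- shorter than the hypothesis (instance[i]).
def Pre_find_s (training_data : List (List String)) : Prop :=
  (∀ e ∈ training_data, e ≠ []) ∧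
  pvPos training_data ≠ [] ∧
  (∀ p ∈ pvPos training_data,
    ((pvPos training_data).headD []).length - 1 ≤ p.length)
instance (training_data : List (List String)) : Decidable (Pre_find_s training_data) := by
  unfold Pre_find_s; infer_instance

def pvWitness_find_s : List (List String) :=
  [["a", "b", "Yes"], ["a", "c", "Yes"], ["x", "y", "No"]]

def Spec_find_s (training_data : List (List String)) (out : List String) : Prop := out = find_s_alt training_data
instance (training_data : List (List String)) (out : List String) : Decidable (Spec_find_s training_data out) := by unfold Spec_find_s; infer_instance

-- ===== CLAIM (what is proved, stated in full; the proofs are below) =====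
def Claim_equal_find_s : Prop := ∀ (training_data : List (List String)), Dom_find_s training_data → Pre_find_s training_data → Spec_find_s training_data (find_s training_data)

-- ===== LEMMAS AND PROOFS =====

-- Nat-indexed, propositional-if form of A's inner step
def pvStepN (inst : List String) (h : List String) (j : Nat) : List String :=
  if h[j]? = inst[j]? then h else h.set j "?"

lemma pvInnerStep_natCast (inst h : List String) (j : Nat) :
    pvInnerStep inst h (j : Int) = pvStepN inst h j := by
  simp only [pvInnerStep, pvStepN, PySem.List.pyGet?_natCast, PySem.List.pySetD_natCast,
    bne_iff_ne, ne_eq, ite_not]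

lemma pvStepN_length (inst h : List String) (j : Nat) :
    (pvStepN inst h j).length = h.length := by
  unfold pvStepN; split <;> simp

lemma pvFoldN_get (inst : List String) (I : List Nat) :
    ∀ (h : List String) (j : Nat),
      (I.foldl (pvStepN inst) h)[j]? =
        if j ∈ I ∧ j < h.length then
          (if h[j]? = inst[j]? then h[j]? else some "?")
        else h[j]? := by
  induction I with
  | nil => intro h j; simp
  | cons i I ih =>
    intro h j
    simp only [List.foldl_cons]
    rw [ih, pvStepN_length]
    by_cases hij : j = i
    · subst hij
      by_cases hjl : j < h.length
      · by_cases hcmp : h[j]? = inst[j]?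
        · have hstep : pvStepN inst h j = h := if_pos hcmp
          have hinner : (if h[j]? = inst[j]? then h[j]? else some "?") = h[j]? :=
            if_pos hcmp
          rw [hstep, hinner, ite_self, ite_self]
        · have hstep : pvStepN inst h j = h.set j "?" := if_neg hcmp
          have hget : (h.set j "?")[j]? = some "?" := by
            simp [hjl]
          rw [hstep, hget, ite_self, ite_self, if_neg hcmp,
            if_pos ⟨by simp, hjl⟩]
      · have hstep : pvStepN inst h j = h := by
          unfold pvStepN; split
          · rfl
          · exact List.set_eq_of_length_le (by omega)
        rw [hstep, if_neg (by intro hh; exact hjl hh.2),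
          if_neg (by intro hh; exact hjl hh.2)]
    · have hne : (pvStepN inst h i)[j]? = h[j]? := by
        unfold pvStepN; split
        · rfl
        · exact List.getElem?_set_ne (by omega)
      rw [hne]
      simp only [List.mem_cons, hij, false_or]

-- the column-wise state that A's fold maintains
def pvCol (hyp0 : List String) (Q : List (List String)) : List String :=
  (List.range hyp0.length).map (fun j =>
    if Q.all (fun p => p[j]? == hyp0[j]?) then hyp0.getD j "" else "?")

lemma pvCol_length (hyp0 : List String) (Q : List (List String)) :
    (pvCol hyp0 Q).length = hyp0.length := by simp [pvCol]

lemma pvCol_nil (hyp0 : List String) : pvCol hyp0 [] = hyp0 := by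
  apply List.ext_getElem
  · simp [pvCol]
  · intro i h1 h2
    simp only [pvCol, List.getElem_map, List.getElem_range, List.all_nil, if_true]
    rw [List.getD_eq_getElem?_getD, List.getElem?_eq_getElem h2]
    rfl

lemma pvCol_get (hyp0 : List String) (Q : List (List String)) (j : Nat)
    (hj : j < hyp0.length) :
    (pvCol hyp0 Q)[j]? =
      some (if Q.all (fun p => p[j]? == hyp0[j]?) then hyp0.getD j "" else "?") := by
  simp [pvCol, hj]

lemma pvFold_pyRange (f : List String → Int → List String) (n : Nat) (init : List String) :
    (PySem.List.pyRange 0 (n : Int) 1).foldl f init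
      = (List.range n).foldl (fun (h : List String) (k : Nat) => f h (k : Int)) init := by
  rw [PySem.List.pyRange_one, List.foldl_map]
  simp only [sub_zero, Int.toNat_natCast, zero_add]

-- one outer iteration turns pvCol Q into pvCol (Q ++ [p])
lemma pvStep_col (hyp0 : List String) (Q : List (List String)) (p : List String) :
    (PySem.List.pyRange 0 ((pvCol hyp0 Q).length : Int) 1).foldl (pvInnerStep p) (pvCol hyp0 Q)
      = pvCol hyp0 (Q ++ [p]) := by
  set cs := pvCol hyp0 Q with hc
  rw [pvFold_pyRange (pvInnerStep p) cs.length cs]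
  have hfn : (fun (h : List String) (k : Nat) => pvInnerStep p h (k : Int)) = pvStepN p := by
    funext h k; exact pvInnerStep_natCast p h k
  rw [hfn]
  apply List.ext_getElem?
  intro j
  rw [pvFoldN_get]
  by_cases hj : j < hyp0.length
  · have hjc : j < cs.length := by rw [hc, pvCol_length]; exact hj
    have h0 : hyp0[j]? = some (hyp0.getD j "") := by
      rw [List.getD_eq_getElem?_getD, List.getElem?_eq_getElem hj]; rfl
    rw [if_pos ⟨by simpa using hjc, hjc⟩, hc, pvCol_get hyp0 Q j hj,
      pvCol_get hyp0 (Q ++ [p]) j hj]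
    have hallsplit : (Q ++ [p]).all (fun q => q[j]? == hyp0[j]?)
        = (Q.all (fun q => q[j]? == hyp0[j]?) && (p[j]? == hyp0[j]?)) := by
      simp [List.all_append]
    rw [hallsplit]
    by_cases hQ : Q.all (fun q => q[j]? == hyp0[j]?)
    · rw [if_pos hQ, hQ, Bool.true_and]
      by_cases hp : p[j]? = hyp0[j]?
      · have hbp : (p[j]? == hyp0[j]?) = true := beq_iff_eq.mpr hp
        rw [hbp, if_pos, if_pos rfl]
        rw [← h0, hp]
      · have hbp : (p[j]? == hyp0[j]?) = false := beq_eq_false_iff_ne.mpr hp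
        rw [hbp, if_neg, if_neg]
        · simp
        · rw [← h0]; exact fun hh => hp hh.symm
    · have hQ' : Q.all (fun q => q[j]? == hyp0[j]?) = false := by
        simpa using hQ
      rw [if_neg hQ, hQ', Bool.false_and, ite_self]
      simp
  · have hjc : ¬ j < cs.length := by rw [hc, pvCol_length]; exact hj
    rw [if_neg (by intro hh; exact hjc hh.2)]
    have h1 : cs[j]? = none := by
      rw [List.getElem?_eq_none_iff]; omega
    have h2 : (pvCol hyp0 (Q ++ [p]))[j]? = none := by
      rw [List.getElem?_eq_none_iff, pvCol_length]; omega
    rw [h1, h2]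

lemma pvOuter (hyp0 : List String) (L : List (List String)) :
    ∀ Q : List (List String),
      L.foldl (fun hyp inst =>
          (PySem.List.pyRange 0 (hyp.length : Int) 1).foldl (pvInnerStep inst) hyp)
        (pvCol hyp0 Q)
      = pvCol hyp0 (Q ++ L) := by
  induction L with
  | nil => intro Q; simp
  | cons p L ih =>
    intro Q
    simp only [List.foldl_cons]
    rw [pvStep_col hyp0 Q p, ih (Q ++ [p])]
    simp

lemma pvFindS_eq_col (training_data : List (List String)) :
    find_s training_data
      = pvCol ((pvPos training_data).headD []).dropLast (pvPos training_data) := by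
  simp only [find_s]
  rw [PySem.List.slice_to_neg_one]
  have := pvOuter ((pvPos training_data).headD []).dropLast (pvPos training_data) []
  rw [pvCol_nil] at this
  simpa using this

-- len(set(a :: t)) = 1 iff every element of t equals a
lemma pvSetLen1 (a : String) (t : List String) :
    ((PySem.Set.ofList (a :: t)).length = 1) ↔ (∀ x ∈ t, x = a) := by
  constructor
  · intro h x hx
    obtain ⟨y, hy⟩ := List.length_eq_one_iff.mp h
    have ha : a ∈ PySem.Set.ofList (a :: t) :=
      (PySem.Set.mem_ofList _ _).mpr (List.mem_cons_self)
    have hx' : x ∈ PySem.Set.ofList (a :: t) :=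
      (PySem.Set.mem_ofList _ _).mpr (List.mem_cons_of_mem a hx)
    rw [hy] at ha hx'
    simp only [List.mem_singleton] at ha hx'
    rw [hx', ha]
  · intro h
    have key : ∀ t' : List String, (∀ x ∈ t', x = a) →
        List.foldl PySem.Set.add [a] t' = [a] := by
      intro t' ht'
      induction t' with
      | nil => rfl
      | cons b t'' ih =>
        have hb : b = a := ht' b (List.mem_cons_self)
        have hadd : PySem.Set.add [a] b = [a] := by
          subst hb; simp [PySem.Set.add, PySem.Set.contains]
        rw [List.foldl_cons, hadd]
        exact ih (fun x hx => ht' x (List.mem_cons_of_mem b hx))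
    have h1 : PySem.Set.ofList (a :: t) = [a] := by
      rw [PySem.Set.ofList_eq_foldl, List.foldl_cons]
      have : PySem.Set.add [] a = [a] := by simp [PySem.Set.add, PySem.Set.contains]
      rw [this]
      exact key t h
    rw [h1]; rfl

-- ===== VERDICT (by name: the statement is the Claim_ definition above) =====
theorem find_s_spec : Claim_equal_find_s := by
  intro training_data _ hpre
  obtain ⟨hrows, hpos, hlens⟩ := hpre
  unfold Spec_find_s
  rw [pvFindS_eq_col]
  obtain ⟨first, rest, hsplit⟩ :
      ∃ f r, pvPos training_data = f :: r := by
    cases hP : pvPos training_data with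
    | nil => exact absurd hP hpos
    | cons f r => exact ⟨f, r, rfl⟩
  simp only [find_s_alt, hsplit, List.headD_cons]
  have hfirstne : first ≠ [] := by
    have : first ∈ training_data := by
      have : first ∈ pvPos training_data := by rw [hsplit]; exact List.mem_cons_self
      exact List.mem_of_mem_filter this
    exact hrows first this
  have hflen : 1 ≤ first.length := by
    cases first with
    | nil => exact absurd rfl hfirstne
    | cons _ _ => simp
  set n := first.length - 1 with hn
  have hnInt : ((first.length : Int) - 1) = ((n : Int)) := by omega
  -- every row of positives has length ≥ n
  have hplen : ∀ p ∈ first :: rest, n ≤ p.length := by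
    intro p hp
    have h2 : first.length ≤ p.length + 1 := by
      have := hlens p (by rw [hsplit]; exact hp)
      simpa [hsplit] using this
    omega
  -- the zip length m satisfies n ≤ m
  have hm : n ≤ rest.foldl (fun acc x => min acc x.length) first.length := by
    have key : ∀ (L : List (List String)) (s : Nat), n ≤ s → (∀ p ∈ L, n ≤ p.length) →
        n ≤ L.foldl (fun acc x => min acc x.length) s := by
      intro L
      induction L with
      | nil => intro s hs _; exact hs
      | cons q L ih =>
        intro s hs hL
        rw [List.foldl_cons]
        exact ih _ (le_min hs (hL q List.mem_cons_self))
          (fun p hp => hL p (List.mem_cons_of_mem q hp))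
    exact key rest first.length (hplen first List.mem_cons_self)
      (fun p hp => hplen p (List.mem_cons_of_mem first hp))
  simp only [pvZipStar, hnInt, PySem.List.slice_to_natCast]
  rw [← List.map_take, List.take_range, min_eq_left hm]
  -- both sides are maps over List.range n; compare pointwise
  have hdlen : first.dropLast.length = n := by
    rw [List.length_dropLast, hn]
  unfold pvCol
  rw [hdlen, List.map_map]
  apply List.map_congr_left
  intro j hj
  have hjn : j < n := List.mem_range.mp hj
  have hjf : j < first.length := by omega
  have hjd : j < first.dropLast.length := by omega
  -- the column values: p.getD j "" with j in range ⇒ p[j]? = some (p.getD j "")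
  have hget : ∀ p ∈ first :: rest, p[j]? = some (p.getD j "") := by
    intro p hp
    have : j < p.length := lt_of_lt_of_le hjn (hplen p hp)
    rw [List.getD_eq_getElem?_getD, List.getElem?_eq_getElem this]; rfl
  have hdl : first.dropLast[j]? = some (first.getD j "") := by
    rw [List.getElem?_dropLast, if_pos (show j < first.length - 1 by omega)]
    exact hget first List.mem_cons_self
  have hgdd : first.dropLast.getD j "" = first.getD j "" := by
    rw [List.getD_eq_getElem?_getD, hdl]; rfl
  simp only [Function.comp]
  -- condition equivalence
  have hcondA : (first :: rest).all (fun p => p[j]? == first.dropLast[j]?) = true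
      ↔ ∀ x ∈ rest, x.getD j "" = first.getD j "" := by
    rw [List.all_eq_true]
    constructor
    · intro hall x hx
      have := hall x (List.mem_cons_of_mem first hx)
      rw [hget x (List.mem_cons_of_mem first hx), hdl] at this
      simpa using this
    · intro hxy p hp
      rcases List.mem_cons.mp hp with h | h
      · rw [h, hget first List.mem_cons_self, hdl]
        simp
      · rw [hget p (List.mem_cons_of_mem first h), hdl]
        simpa using hxy p h
  have hcondB : ((PySem.Set.ofList
        ((first :: rest).map (fun row => row.getD j ""))).length = 1)
      ↔ ∀ x ∈ rest, x.getD j "" = first.getD j "" := by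
    rw [List.map_cons, pvSetLen1]
    constructor
    · intro h x hx
      exact h (x.getD j "") (List.mem_map_of_mem hx)
    · intro h y hy
      obtain ⟨x, hx, hxy⟩ := List.mem_map.mp hy
      rw [← hxy]; exact h x hx
  by_cases hc : ∀ x ∈ rest, x.getD j "" = first.getD j ""
  · rw [if_pos (hcondA.mpr hc), if_pos (by exact beq_iff_eq.mpr (hcondB.mpr hc)), hgdd]
    simp
  · rw [if_neg (fun hh => hc (hcondA.mp hh)),
      if_neg (by simp only [beq_iff_eq]; exact fun hh => hc (hcondB.mp hh))]
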